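-- pv_equiv track=rewrite | github.com/Jacksonbaker323/LP3THW | ex48/ex48/lexicon.py | scan
-- ===== SOURCE A (Python) =====
-- def scan(sentence):
--     #Accept a string as an argument
--     #Create an array to return all of the necessary information
--     results = []
--
--     #split that string into an array
--     split_string = sentence.split(" ")
--
--     #look for any direction words in the array
--     for word in split_string:
--         if word.lower() in ('north', 'south', 'east', 'west', 'down', 'up', 'left', 'right', 'back'):
--             results.append(('direction', word))
--         elif word.lower() in ('go', 'kill', 'eat', 'stop'):
--             results.append(('verb', word))
--         elif word.lower() in ('the', 'in', 'of', 'from', 'at', 'it'):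
--             results.append(('stop', word))
--         elif word.lower() in ('bear', 'princess'):
--             results.append(('noun', word))
--         elif word.isdigit():
--             results.append(('number', word))
--         else:
--             results.append(('error', word))
--     #return all the direction words as an array of tuples with 'direction' and the direction
--     return results
-- ===== SOURCE B (Python) =====
-- _LEX = {
--     word: tag
--     for tag, words in (
--         ("direction", ("north", "south", "east", "west", "down", "up", "left", "right", "back")),
--         ("verb", ("go", "kill", "eat", "stop")),
--         ("stop", ("the", "in", "of", "from", "at", "it")),
--         ("noun", ("bear", "princess")),
--     )
--     for word in words
-- }
--
--
-- def _tag_of(word):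
--     tag = _LEX.get(word.lower())
--     if tag is not None:
--         return tag
--     return "number" if word.isdigit() else "error"
--
--
-- def scan(sentence):
--     # One streaming character-level pass: build each word ourselves and flush
--     # it (tagged) at every space; a trailing sentinel space flushes the last word.
--     results = []
--     word = ""
--     for ch in sentence + " ":
--         if ch == " ":
--             results.append((_tag_of(word), word))
--             word = ""
--         else:
--             word += ch
--     return results
-- ===== Notes on version B (the rewrite author's own statement) =====
-- stated objective: alternative
-- what changed: B never calls split and has no elif cascade: it streams over the characters in one pass, building each word itself and flushing a tagged tuple at every space (with a trailing sentinel space), classifying via one precomputed keyword->tag table.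
import Mathlib
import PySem

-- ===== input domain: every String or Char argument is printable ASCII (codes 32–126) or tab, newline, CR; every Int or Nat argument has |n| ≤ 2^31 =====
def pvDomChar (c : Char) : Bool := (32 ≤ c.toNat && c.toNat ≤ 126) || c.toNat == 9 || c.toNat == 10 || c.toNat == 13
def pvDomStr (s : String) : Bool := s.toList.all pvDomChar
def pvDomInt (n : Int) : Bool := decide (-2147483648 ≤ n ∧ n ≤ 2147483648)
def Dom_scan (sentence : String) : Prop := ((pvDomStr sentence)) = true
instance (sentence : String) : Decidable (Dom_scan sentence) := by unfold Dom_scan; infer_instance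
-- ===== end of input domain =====

-- B replaces A's split-then-classify loop with one streaming character pass that builds
-- each word itself, flushing a tagged tuple at every space, via a precomputed keyword->tag
-- table (objective: alternative).

-- ===== PORT A =====
def scan (sentence : String) : List (String × String) :=
  ((PySem.Str.split? sentence " ").getD []).foldl (fun results word =>
    if PySem.Str.lower word ∈ ["north", "south", "east", "west", "down", "up", "left", "right", "back"] then
      results ++ [("direction", word)]
    else if PySem.Str.lower word ∈ ["go", "kill", "eat", "stop"] then
      results ++ [("verb", word)]
    else if PySem.Str.lower word ∈ ["the", "in", "of", "from", "at", "it"] then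
      results ++ [("stop", word)]
    else if PySem.Str.lower word ∈ ["bear", "princess"] then
      results ++ [("noun", word)]
    else if PySem.Str.strIsdigit word then
      results ++ [("number", word)]
    else
      results ++ [("error", word)]) []

-- ===== PORT B =====
-- the dict comprehension of Source B: flatten the (tag, words) pairs into one keyword->tag dict
def pvLex : PySem.Dict String String :=
  ([("direction", ["north", "south", "east", "west", "down", "up", "left", "right", "back"]),
    ("verb", ["go", "kill", "eat", "stop"]),
    ("stop", ["the", "in", "of", "from", "at", "it"]),
    ("noun", ["bear", "princess"])] : List (String × List String)).foldl
    (fun d p => p.2.foldl (fun d w => d.insert w p.1) d) PySem.Dict.empty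

-- Source B's _tag_of: one table lookup, then the isdigit fallback
def pvTagOf (word : String) : String :=
  match pvLex.get? (PySem.Str.lower word) with
  | some tag => tag
  | none => if PySem.Str.strIsdigit word then "number" else "error"

-- Source B's loop body; the growing word is kept as its character list (exact for Python str concat)
def pvStep (st : List (String × String) × List Char) (c : Char) : List (String × String) × List Char :=
  if c = ' ' then (st.1 ++ [(pvTagOf (String.ofList st.2), String.ofList st.2)], [])
  else (st.1, st.2 ++ [c])

def scan_alt (sentence : String) : List (String × String) :=
  ((sentence.toList ++ [' ']).foldl pvStep ([], [])).1

-- ===== PRECONDITION & SPEC =====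
def Spec_scan (sentence : String) (out : List (String × String)) : Prop := out = scan_alt sentence
instance (sentence : String) (out : List (String × String)) : Decidable (Spec_scan sentence out) := by unfold Spec_scan; infer_instance

-- ===== CLAIM (what is proved, stated in full; the proofs are below) =====
def Claim_equal_scan : Prop := ∀ (sentence : String), Dom_scan sentence → Spec_scan sentence (scan sentence)

-- ===== LEMMAS AND PROOFS =====

-- the chunks of a character list cut at every space, with w the pending prefix of the first chunk
def pvChunks (w : List Char) : List Char → List (List Char)
  | [] => [w]
  | c :: rest => if c = ' ' then w :: pvChunks [] rest else pvChunks (w ++ [c]) rest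

theorem pvLex_eq : pvLex = PySem.Dict.mk
    [("north", "direction"), ("south", "direction"), ("east", "direction"), ("west", "direction"),
     ("down", "direction"), ("up", "direction"), ("left", "direction"), ("right", "direction"),
     ("back", "direction"), ("go", "verb"), ("kill", "verb"), ("eat", "verb"), ("stop", "verb"),
     ("the", "stop"), ("in", "stop"), ("of", "stop"), ("from", "stop"), ("at", "stop"),
     ("it", "stop"), ("bear", "noun"), ("princess", "noun")] := by rfl

set_option maxHeartbeats 1000000 in
theorem pvTagOf_eq (word : String) : pvTagOf word =
    (if PySem.Str.lower word ∈ ["north", "south", "east", "west", "down", "up", "left", "right", "back"] then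
      "direction"
    else if PySem.Str.lower word ∈ ["go", "kill", "eat", "stop"] then "verb"
    else if PySem.Str.lower word ∈ ["the", "in", "of", "from", "at", "it"] then "stop"
    else if PySem.Str.lower word ∈ ["bear", "princess"] then "noun"
    else if PySem.Str.strIsdigit word then "number"
    else "error") := by
  unfold pvTagOf
  rw [pvLex_eq]
  generalize PySem.Str.lower word = lw
  by_cases h0 : lw = "north"
  · subst h0; rfl
  by_cases h1 : lw = "south"
  · subst h1; rfl
  by_cases h2 : lw = "east"
  · subst h2; rfl
  by_cases h3 : lw = "west"
  · subst h3; rfl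
  by_cases h4 : lw = "down"
  · subst h4; rfl
  by_cases h5 : lw = "up"
  · subst h5; rfl
  by_cases h6 : lw = "left"
  · subst h6; rfl
  by_cases h7 : lw = "right"
  · subst h7; rfl
  by_cases h8 : lw = "back"
  · subst h8; rfl
  by_cases h9 : lw = "go"
  · subst h9; rfl
  by_cases h10 : lw = "kill"
  · subst h10; rfl
  by_cases h11 : lw = "eat"
  · subst h11; rfl
  by_cases h12 : lw = "stop"
  · subst h12; rfl
  by_cases h13 : lw = "the"
  · subst h13; rfl
  by_cases h14 : lw = "in"
  · subst h14; rfl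
  by_cases h15 : lw = "of"
  · subst h15; rfl
  by_cases h16 : lw = "from"
  · subst h16; rfl
  by_cases h17 : lw = "at"
  · subst h17; rfl
  by_cases h18 : lw = "it"
  · subst h18; rfl
  by_cases h19 : lw = "bear"
  · subst h19; rfl
  by_cases h20 : lw = "princess"
  · subst h20; rfl
  simp only [PySem.Dict.get?_mk_cons, List.mem_cons, List.not_mem_nil, or_false]
  rw [if_neg (fun h => h0 (eq_of_beq h).symm), if_neg (fun h => h1 (eq_of_beq h).symm), if_neg (fun h => h2 (eq_of_beq h).symm), if_neg (fun h => h3 (eq_of_beq h).symm), if_neg (fun h => h4 (eq_of_beq h).symm), if_neg (fun h => h5 (eq_of_beq h).symm), if_neg (fun h => h6 (eq_of_beq h).symm), if_neg (fun h => h7 (eq_of_beq h).symm), if_neg (fun h => h8 (eq_of_beq h).symm), if_neg (fun h => h9 (eq_of_beq h).symm), if_neg (fun h => h10 (eq_of_beq h).symm), if_neg (fun h => h11 (eq_of_beq h).symm), if_neg (fun h => h12 (eq_of_beq h).symm), if_neg (fun h => h13 (eq_of_beq h).symm), if_neg (fun h => h14 (eq_of_beq h).symm), if_neg (fun h => h15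 (eq_of_beq h).symm), if_neg (fun h => h16 (eq_of_beq h).symm), if_neg (fun h => h17 (eq_of_beq h).symm), if_neg (fun h => h18 (eq_of_beq h).symm), if_neg (fun h => h19 (eq_of_beq h).symm), if_neg (fun h => h20 (eq_of_beq h).symm)]
  simp [PySem.Dict.get?, h0, h1, h2, h3, h4, h5, h6, h7, h8, h9, h10, h11, h12, h13, h14, h15, h16, h17, h18, h19, h20]

-- PySem's space-splitter equals pvChunks
theorem splitOn_go_eq (fuel : Nat) : ∀ (l cur : List Char) (acc : List (List Char)), l.length < fuel →
    PySem.Chars.splitOn.go [' '] fuel l cur acc = acc.reverse ++ pvChunks cur.reverse l := by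
  induction fuel with
  | zero => intro l cur acc h; omega
  | succ f ih =>
    intro l cur acc h
    cases l with
    | nil => rw [PySem.Chars.splitOn.go.eq_def]; simp [pvChunks]
    | cons c rest =>
      by_cases hc : c = ' '
      · subst hc
        rw [show PySem.Chars.splitOn.go [' '] (f+1) (' ' :: rest) cur acc
              = PySem.Chars.splitOn.go [' '] f rest [] (cur.reverse :: acc) from by
            rw [PySem.Chars.splitOn.go.eq_def]; simp [List.isPrefixOf]]
        rw [ih _ _ _ (by simpa using Nat.lt_of_succ_lt_succ h)]
        simp [pvChunks]
      · rw [show PySem.Chars.splitOn.go [' '] (f+1) (c :: rest) cur acc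
              = PySem.Chars.splitOn.go [' '] f rest (c :: cur) acc from by
            rw [PySem.Chars.splitOn.go.eq_def]
            have hc' : (' ' == c) = false := beq_eq_false_iff_ne.mpr (fun h => hc h.symm)
            simp [List.isPrefixOf, hc']]
        rw [ih _ _ _ (by simpa using Nat.lt_of_succ_lt_succ h)]
        simp [pvChunks, hc]

theorem splitOn_eq (s : List Char) : PySem.Chars.splitOn s [' '] = pvChunks [] s := by
  have := splitOn_go_eq (s.length + 1) s [] [] (by omega)
  simpa [PySem.Chars.splitOn] using this

-- B's streaming fold equals mapping the classifier over the chunks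
theorem fold_eq (l : List Char) : ∀ (res : List (String × String)) (w : List Char),
    (l ++ [' ']).foldl pvStep (res, w)
      = (res ++ (pvChunks w l).map (fun cs => (pvTagOf (String.ofList cs), String.ofList cs)), []) := by
  induction l with
  | nil => intro res w; simp [pvStep, pvChunks]
  | cons c rest ih =>
    intro res w
    by_cases hc : c = ' '
    · subst hc
      simp only [List.cons_append, List.foldl_cons, pvStep, ih, pvChunks]
      simp
    · simp only [List.cons_append, List.foldl_cons, pvStep, ih, pvChunks, if_neg hc]

-- A's fold equals mapping the cascade over the split words
theorem scan_eq_map (sentence : String) : scan sentence =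
    (PySem.Chars.splitOn sentence.toList [' ']).map
      (fun cs => (pvTagOf (String.ofList cs), String.ofList cs)) := by
  unfold scan
  have hsplit : (PySem.Str.split? sentence " ").getD []
      = (PySem.Chars.splitOn sentence.toList [' ']).map String.ofList := by
    simp [PySem.Str.split?, PySem.Chars.split?]
  rw [hsplit]
  have h : ∀ (l : List (List Char)) (acc : List (String × String)),
      (l.map String.ofList).foldl (fun results word =>
        if PySem.Str.lower word ∈ ["north", "south", "east", "west", "down", "up", "left", "right", "back"] then
          results ++ [("direction", word)]
        else if PySem.Str.lower word ∈ ["go", "kill", "eat", "stop"] then results ++ [("verb", word)]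
        else if PySem.Str.lower word ∈ ["the", "in", "of", "from", "at", "it"] then results ++ [("stop", word)]
        else if PySem.Str.lower word ∈ ["bear", "princess"] then results ++ [("noun", word)]
        else if PySem.Str.strIsdigit word then results ++ [("number", word)]
        else results ++ [("error", word)]) acc
      = acc ++ l.map (fun cs => (pvTagOf (String.ofList cs), String.ofList cs)) := by
    intro l
    induction l with
    | nil => simp
    | cons w t ih =>
      intro acc
      simp only [List.map_cons, List.foldl_cons, ih, pvTagOf_eq]
      split_ifs <;> simp_all
  simpa using h _ []

-- ===== VERDICT (by name: the statement is the Claim_ definition above) =====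
theorem scan_spec : Claim_equal_scan := by
  intro s _
  unfold Spec_scan scan_alt
  rw [scan_eq_map, splitOn_eq, fold_eq]
  simp
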